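-- pv_equiv track=rewrite | github.com/ARCAlhau80/LotoScope | poc_incompatibilidade_filtros_pool23.py | filtro_seq_max
-- ===== SOURCE A (Python) =====
-- def filtro_seq_max(combo, config):
--     if 'seq_max' not in config:
--         return True
--     nums = sorted(combo)
--     max_seq = 1
--     seq = 1
--     for idx in range(1, len(nums)):
--         if nums[idx] == nums[idx - 1] + 1:
--             seq += 1
--             max_seq = max(max_seq, seq)
--         else:
--             seq = 1
--     return max_seq <= config['seq_max']
-- ===== SOURCE B (Python) =====
-- def filtro_seq_max(combo, config):
--     if 'seq_max' not in config:
--         return True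
--     m = config['seq_max']
--     if m < 1:
--         return False  # a run always has length at least 1, so thresholds below 1 always fail
--     nums = sorted(combo)
--     # decision form: pass iff no window of m+1 consecutive increasing-by-1 values exists
--     return not any(
--         all(nums[i + k + 1] == nums[i + k] + 1 for k in range(m))
--         for i in range(len(nums) - m)
--     )
-- ===== Notes on version B (the rewrite author's own statement) =====
-- stated objective: alternative
-- what changed: B never computes the maximum run length: after the m<1 short-circuit it decides the threshold directly by testing whether any window of m+1 consecutive-by-1 values exists in the sorted combo (existential window search), instead of A's running seq/max_seq accumulator loop.
import Mathlib
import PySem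

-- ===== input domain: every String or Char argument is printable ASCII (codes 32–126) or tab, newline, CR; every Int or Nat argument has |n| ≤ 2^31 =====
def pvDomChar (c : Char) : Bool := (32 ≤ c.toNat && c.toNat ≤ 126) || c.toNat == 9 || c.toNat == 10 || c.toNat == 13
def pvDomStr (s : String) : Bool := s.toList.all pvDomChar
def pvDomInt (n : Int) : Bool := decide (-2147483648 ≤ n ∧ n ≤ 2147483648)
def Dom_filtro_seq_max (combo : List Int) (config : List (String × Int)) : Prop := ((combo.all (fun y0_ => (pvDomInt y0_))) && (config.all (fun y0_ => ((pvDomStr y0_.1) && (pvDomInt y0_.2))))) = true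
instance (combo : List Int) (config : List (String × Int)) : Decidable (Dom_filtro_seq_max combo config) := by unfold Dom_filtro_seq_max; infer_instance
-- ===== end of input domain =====

-- B never computes the maximum run length: it decides the threshold directly by searching
-- for a window of seq_max+1 consecutive-by-1 values in the sorted combo (alternative algorithm).

-- ===== PORT A =====
def filtro_seq_max (combo : List Int) (config : List (String × Int)) : Bool :=
  match (PySem.Dict.ofList config).get? "seq_max" with
  | none => true            -- 'seq_max' not in config
  | some m =>
      let nums := PySem.List.sorted combo (fun x => x) false
      let st := (PySem.List.pyRange 1 (nums.length : Int) 1).foldl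
        (fun (p : Int × Int) idx =>
          if PySem.List.pyGetD nums idx 0 = PySem.List.pyGetD nums (idx - 1) 0 + 1 then
            (max p.1 (p.2 + 1), p.2 + 1)   -- seq += 1; max_seq = max(max_seq, seq)
          else
            (p.1, 1)) (1, 1)               -- state (max_seq, seq)
      decide (st.1 ≤ m)

-- ===== PORT B =====
def filtro_seq_max_alt (combo : List Int) (config : List (String × Int)) : Bool :=
  match (PySem.Dict.ofList config).get? "seq_max" with
  | none => true
  | some m =>
      if m < 1 then false    -- a run always has length ≥ 1, so thresholds below 1 always fail
      else
        let nums := PySem.List.sorted combo (fun x => x) false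
        -- not any(all(nums[i+k+1] == nums[i+k] + 1 for k in range(m)) for i in range(len(nums) - m))
        !((PySem.List.pyRange 0 ((nums.length : Int) - m) 1).any (fun i =>
            (PySem.List.pyRange 0 m 1).all (fun k =>
              PySem.List.pyGetD nums (i + k + 1) 0 == PySem.List.pyGetD nums (i + k) 0 + 1)))

-- ===== PRECONDITION & SPEC =====
def Spec_filtro_seq_max (combo : List Int) (config : List (String × Int)) (out : Bool) : Prop := out = filtro_seq_max_alt combo config
instance (combo : List Int) (config : List (String × Int)) (out : Bool) : Decidable (Spec_filtro_seq_max combo config out) := by unfold Spec_filtro_seq_max; infer_instance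

-- ===== CLAIM (what is proved, stated in full; the proofs are below) =====
def Claim_equal_filtro_seq_max : Prop := ∀ (combo : List Int) (config : List (String × Int)), Dom_filtro_seq_max combo config → Spec_filtro_seq_max combo config (filtro_seq_max combo config)

-- ===== LEMMAS AND PROOFS =====

-- adjacent-consecutiveness flags of the sorted list: flags[j] = (nums[j+1] == nums[j] + 1)
def pvFlags (nums : List Int) : List Bool :=
  (nums.zip nums.tail).map (fun q => decide (q.2 = q.1 + 1))

-- A's loop, rephrased as structural recursion over the flags (state = (max_seq, seq))
def pvAF : List Bool → Int → Int → Int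
  | [], ms, _ => ms
  | b :: F, ms, s => if b then pvAF F (max ms (s + 1)) (s + 1) else pvAF F ms 1

-- number of leading 'true' flags
def pvLead : List Bool → Nat
  | [] => 0
  | true :: F => pvLead F + 1
  | false :: _ => 0

-- B's search: does some suffix start with m' consecutive 'true' flags?
def pvHasWin (m' : Nat) : List Bool → Bool
  | [] => decide (m' ≤ 0)
  | b :: F => decide (m' ≤ pvLead (b :: F)) || pvHasWin m' F

lemma pvAF_cons_false (F : List Bool) (ms s : Int) : pvAF (false :: F) ms s = pvAF F ms 1 := rfl

lemma pvAF_cons_true (F : List Bool) (ms s : Int) : pvAF (true :: F) ms s = pvAF F (max ms (s + 1)) (s + 1) := rfl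

-- A's index loop over range(1, len(nums)) reads exactly the adjacent pairs of nums
lemma pvMapPairs (nums : List Int) :
    (PySem.List.pyRange 1 (nums.length : Int) 1).map
      (fun idx => (PySem.List.pyGetD nums (idx - 1) 0, PySem.List.pyGetD nums idx 0))
    = nums.zip nums.tail := by
  apply List.ext_getElem
  · simp [PySem.List.length_pyRange_one, List.length_zip, List.length_tail]
  · intro k h1 h2
    have hk : k < nums.length - 1 := by
      simpa [PySem.List.length_pyRange_one] using h1
    have hk1 : k < nums.length := by omega
    have hk2 : k + 1 < nums.length := by omega
    simp only [List.getElem_map, List.getElem_zip, List.getElem_tail]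
    rw [PySem.List.getElem_pyRange_one]
    simp only [Prod.mk.injEq]
    refine ⟨?_, ?_⟩
    · have : (1 : Int) + (k : Int) - 1 = ((k : Nat) : Int) := by omega
      rw [this, PySem.List.pyGetD_natCast, List.getD_eq_getElem _ _ hk1]
    · have : (1 : Int) + (k : Int) = (((k + 1 : Nat)) : Int) := by omega
      rw [this, PySem.List.pyGetD_natCast, List.getD_eq_getElem _ _ hk2]

-- the fold over adjacent pairs is pvAF over the flags
lemma pvZipFoldF (pairs : List (Int × Int)) : ∀ (ms s : Int),
    ((pairs.foldl
      (fun (p : Int × Int) (q : Int × Int) =>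
        if q.2 = q.1 + 1 then (max p.1 (p.2 + 1), p.2 + 1) else (p.1, 1)) (ms, s)).1)
    = pvAF (pairs.map (fun q => decide (q.2 = q.1 + 1))) ms s := by
  induction pairs with
  | nil => intro ms s; rfl
  | cons q t ih =>
      intro ms s
      by_cases h : q.2 = q.1 + 1 <;> simp [pvAF, h, ih]

-- A's port loop equals pvAF of the flags at (1, 1)
lemma pvAside (nums : List Int) :
    ((PySem.List.pyRange 1 (nums.length : Int) 1).foldl
      (fun (p : Int × Int) idx =>
        if PySem.List.pyGetD nums idx 0 = PySem.List.pyGetD nums (idx - 1) 0 + 1 then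
          (max p.1 (p.2 + 1), p.2 + 1)
        else (p.1, 1)) (1, 1)).1
    = pvAF (pvFlags nums) 1 1 := by
  have hfold :
      ((PySem.List.pyRange 1 (nums.length : Int) 1).foldl
        (fun (p : Int × Int) idx =>
          if PySem.List.pyGetD nums idx 0 = PySem.List.pyGetD nums (idx - 1) 0 + 1 then
            (max p.1 (p.2 + 1), p.2 + 1)
          else (p.1, 1)) (1, 1))
      = ((nums.zip nums.tail).foldl
          (fun (p : Int × Int) (q : Int × Int) =>
            if q.2 = q.1 + 1 then (max p.1 (p.2 + 1), p.2 + 1) else (p.1, 1)) (1, 1)) := by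
    rw [← pvMapPairs nums, List.foldl_map]
  rw [hfold, pvZipFoldF]
  rfl

-- ms only grows through A's loop
lemma pvAF_ge (F : List Bool) : ∀ (ms s : Int), ms ≤ pvAF F ms s := by
  induction F with
  | nil => intro ms s; exact le_refl ms
  | cons b F ih =>
      intro ms s
      cases b
      · simpa [pvAF] using ih ms 1
      · simp only [pvAF, if_pos]
        exact le_trans (le_max_left ms (s + 1)) (ih (max ms (s + 1)) (s + 1))

lemma pvHasWin_of_lead {m' : Nat} {F : List Bool} (h : m' ≤ pvLead F) :
    pvHasWin m' F = true := by
  cases F with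
  | nil => simp [pvHasWin, pvLead] at h ⊢; omega
  | cons b F => simp [pvHasWin]; left; exact h

-- m' leading trues ↔ the first m' flags (which exist) are all true
lemma pvLead_iff (F : List Bool) : ∀ (m' : Nat),
    m' ≤ pvLead F ↔ (m' ≤ F.length ∧ ∀ k < m', F.getD k false = true) := by
  induction F with
  | nil =>
      intro m'
      simp only [pvLead, List.length_nil, Nat.le_zero]
      constructor
      · rintro rfl; exact ⟨rfl, by omega⟩
      · rintro ⟨rfl, _⟩; rfl
  | cons b F ih =>
      intro m'
      cases m' with
      | zero => simp
      | succ k' =>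
          cases b
          · simp only [pvLead, Nat.le_zero, List.length_cons]
            constructor
            · omega
            · rintro ⟨_, h⟩
              have := h 0 (by omega)
              simp at this
          · simp only [pvLead, List.length_cons, Nat.add_le_add_iff_right, ih k']
            constructor
            · rintro ⟨h1, h2⟩
              refine ⟨by omega, ?_⟩
              intro k hk
              cases k with
              | zero => rfl
              | succ j => simpa using h2 j (by omega)
            · rintro ⟨h1, h2⟩
              refine ⟨by omega, ?_⟩
              intro k hk
              simpa using h2 (k + 1) (by omega)

-- pvHasWin is the existence of an m'-window of trues
lemma pvHasWin_iff (F : List Bool) : ∀ (m' : Nat),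
    pvHasWin m' F = true ↔ ∃ i, i + m' ≤ F.length ∧ ∀ k < m', F.getD (i + k) false = true := by
  induction F with
  | nil =>
      intro m'
      simp only [pvHasWin, decide_eq_true_eq, List.length_nil]
      constructor
      · intro h; exact ⟨0, by omega, by omega⟩
      · rintro ⟨i, h1, _⟩; omega
  | cons b F ih =>
      intro m'
      simp only [pvHasWin, Bool.or_eq_true, decide_eq_true_eq, ih, pvLead_iff]
      constructor
      · rintro (⟨h1, h2⟩ | ⟨i, h1, h2⟩)
        · exact ⟨0, by simpa using h1, by simpa using h2⟩
        · refine ⟨i + 1, by simp; omega, ?_⟩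
          intro k hk
          simpa [Nat.add_right_comm] using h2 k hk
      · rintro ⟨i, h1, h2⟩
        cases i with
        | zero => exact Or.inl ⟨by simpa using h1, by simpa using h2⟩
        | succ j =>
            refine Or.inr ⟨j, by simp at h1; omega, ?_⟩
            intro k hk
            simpa [Nat.add_right_comm] using h2 k hk

-- core invariant: A's threshold test ↔ no window, given the running state
lemma pvCore (F : List Bool) : ∀ (ms s : Int) (m' : Nat), 1 ≤ m' → 1 ≤ s → s ≤ ms →
    (pvAF F ms s ≤ (m' : Int) ↔
      ms ≤ (m' : Int) ∧ s + (pvLead F : Int) ≤ (m' : Int) ∧ pvHasWin m' F = false) := by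
  induction F with
  | nil =>
      intro ms s m' hm hs hsm
      have : pvHasWin m' [] = false := by simp [pvHasWin]; omega
      simp only [pvAF, pvLead, this, and_true, Nat.cast_zero, add_zero]
      constructor
      · intro h; exact ⟨h, by omega⟩
      · rintro ⟨h, _⟩; exact h
  | cons b F ih =>
      intro ms s m' hm hs hsm
      cases b
      · -- flag false: seq resets to 1
        have hw : pvHasWin m' (false :: F) = pvHasWin m' F := by
          simp [pvHasWin, pvLead]; omega
        rw [pvAF_cons_false]
        simp only [pvLead, hw, Nat.cast_zero, add_zero]
        rw [ih ms 1 m' hm (by omega) (by omega)]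
        constructor
        · rintro ⟨h1, _, h3⟩
          exact ⟨h1, by omega, h3⟩
        · rintro ⟨h1, h2, h3⟩
          refine ⟨h1, ?_, h3⟩
          by_contra hlt
          have : m' ≤ pvLead F := by
            push Not at hlt
            have : (m' : Int) < 1 + pvLead F := hlt
            omega
          rw [pvHasWin_of_lead this] at h3
          exact Bool.true_eq_false ▸ (by simp at h3)
      · -- flag true: seq extends
        rw [pvAF_cons_true]
        simp only [pvLead]
        rw [ih (max ms (s + 1)) (s + 1) m' hm (by omega) (by omega)]
        have hl : (0 : Int) ≤ (pvLead F : Int) := by positivity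
        constructor
        · rintro ⟨h1, h2, h3⟩
          have hw : pvHasWin m' (true :: F) = false := by
            simp only [pvHasWin, Bool.or_eq_false_iff, decide_eq_false_iff_not]
            refine ⟨?_, h3⟩
            simp only [pvLead]
            omega
          refine ⟨by omega, by push_cast; omega, hw⟩
        · rintro ⟨h1, h2, h3⟩
          have h3' : pvHasWin m' F = false := by
            simp only [pvHasWin, Bool.or_eq_false_iff] at h3
            exact h3.2
          push_cast at h2
          exact ⟨by omega, by omega, h3'⟩

-- the flags read back the adjacent comparison
lemma pvFlags_length (nums : List Int) : (pvFlags nums).length = nums.length - 1 := by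
  simp [pvFlags, List.length_zip, List.length_tail]

lemma pvFlags_getD (nums : List Int) (j : Nat) (h : j < (pvFlags nums).length) :
    (pvFlags nums).getD j false = decide (nums.getD (j + 1) 0 = nums.getD j 0 + 1) := by
  have hj : j < nums.length - 1 := by rwa [pvFlags_length] at h
  have h1 : j < nums.length := by omega
  have h2 : j + 1 < nums.length := by omega
  rw [List.getD_eq_getElem _ _ h]
  simp only [pvFlags, List.getElem_map, List.getElem_zip, List.getElem_tail]
  rw [List.getD_eq_getElem _ _ h1, List.getD_eq_getElem _ _ h2]

-- B's double pyRange scan is pvHasWin on the flags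
lemma pvBside (nums : List Int) (m' : Nat) (hm : 1 ≤ m') :
    ((PySem.List.pyRange 0 ((nums.length : Int) - (m' : Int)) 1).any (fun i =>
        (PySem.List.pyRange 0 (m' : Int) 1).all (fun k =>
          PySem.List.pyGetD nums (i + k + 1) 0 == PySem.List.pyGetD nums (i + k) 0 + 1)))
    = pvHasWin m' (pvFlags nums) := by
  rw [Bool.eq_iff_iff]
  rw [pvHasWin_iff]
  rw [List.any_eq_true]
  constructor
  · rintro ⟨x, hx, hall⟩
    rw [PySem.List.mem_pyRange_one] at hx
    obtain ⟨hx0, hxN⟩ := hx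
    rw [List.all_eq_true] at hall
    set i : Nat := x.toNat with hi
    have hxi : x = (i : Int) := by omega
    refine ⟨i, ?_, ?_⟩
    · rw [pvFlags_length]; omega
    · intro k hk
      have hmem : ((k : Int)) ∈ PySem.List.pyRange 0 (m' : Int) 1 := by
        rw [PySem.List.mem_pyRange_one]; omega
      have := hall _ hmem
      rw [beq_iff_eq] at this
      have e1 : x + (k : Int) + 1 = ((i + k + 1 : Nat) : Int) := by push_cast; omega
      have e2 : x + (k : Int) = ((i + k : Nat) : Int) := by push_cast; omega
      rw [e1, e2, PySem.List.pyGetD_natCast, PySem.List.pyGetD_natCast] at this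
      rw [pvFlags_getD nums (i + k) (by rw [pvFlags_length]; omega)]
      simpa using this
  · rintro ⟨i, hlen, hall⟩
    rw [pvFlags_length] at hlen
    have hn : i + m' ≤ nums.length - 1 := hlen
    have hn1 : 1 ≤ nums.length := by omega
    refine ⟨(i : Int), ?_, ?_⟩
    · rw [PySem.List.mem_pyRange_one]
      constructor
      · positivity
      · omega
    · rw [List.all_eq_true]
      intro y hy
      rw [PySem.List.mem_pyRange_one] at hy
      obtain ⟨hy0, hym⟩ := hy
      set k : Nat := y.toNat with hk
      have hyk : y = (k : Int) := by omega
      have hkm : k < m' := by omega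
      have := hall k hkm
      rw [pvFlags_getD nums (i + k) (by rw [pvFlags_length]; omega)] at this
      rw [beq_iff_eq, hyk]
      have e1 : (i : Int) + (k : Int) + 1 = ((i + k + 1 : Nat) : Int) := by push_cast; omega
      have e2 : (i : Int) + (k : Int) = ((i + k : Nat) : Int) := by push_cast; omega
      rw [e1, e2, PySem.List.pyGetD_natCast, PySem.List.pyGetD_natCast]
      simpa using this

-- ===== VERDICT (by name: the statement is the Claim_ definition above) =====
theorem filtro_seq_max_spec : Claim_equal_filtro_seq_max := by
  intro combo config _
  unfold Spec_filtro_seq_max filtro_seq_max filtro_seq_max_alt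
  cases h : (PySem.Dict.ofList config).get? "seq_max" with
  | none => rfl
  | some m =>
      simp only
      set nums := PySem.List.sorted combo (fun x => x) false with hnums
      rw [pvAside nums]
      by_cases hm : m < 1
      · rw [if_pos hm]
        have h1 : (1 : Int) ≤ pvAF (pvFlags nums) 1 1 := pvAF_ge (pvFlags nums) 1 1
        simp only [decide_eq_false_iff_not, not_le]
        omega
      · rw [if_neg hm]
        push Not at hm
        set m' : Nat := m.toNat with hm'
        have hmm : m = (m' : Int) := by omega
        have hmge : 1 ≤ m' := by omega
        rw [hmm, pvBside nums m' hmge]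
        have hcore := pvCore (pvFlags nums) 1 1 m' hmge (by omega) (by omega)
        rw [Bool.eq_iff_iff]
        simp only [decide_eq_true_eq, Bool.not_eq_true', hcore]
        constructor
        · rintro ⟨_, _, h3⟩; exact h3
        · intro h3
          refine ⟨by omega, ?_, h3⟩
          by_contra hlt
          have hle : m' ≤ pvLead (pvFlags nums) := by omega
          rw [pvHasWin_of_lead hle] at h3
          simp at h3
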